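-- pv_equiv track=rewrite | github.com/3DpoNCh1k/csc_new_year_contest_2021 | python_piet/B/B.py | cmds_to_string
-- ===== SOURCE A (Python) =====
-- OUT = (5, 1)
--
-- def transition(cell, cmd):
--     h, l = cell
--     dh, dl = cmd
--     nh, nl = (h + dh) % 6, (l + dl) % 3
--     return (nh, nl)
--
-- HUE = "rygcbm"
--
-- LIGHTNESS = "lnd"
--
-- def cmds_to_string(cmds):
--     start = 0, 1
--     cur = start
--     ans = []
--     for cmd in cmds + [OUT]:
--         i, j = cur
--         ans.append(LIGHTNESS[j]+HUE[i])
--         cur = transition(cur, cmd)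
--     return " ".join(ans)
-- ===== SOURCE B (Python) =====
-- HUE = "rygcbm"
-- LIGHTNESS = "lnd"
--
-- def cmds_to_string(cmds):
--     # compute the final raw delta sums, then walk the commands BACKWARDS,
--     # emitting each state's token back-to-front by subtracting deltas
--     H = sum(dh for dh, _ in cmds)
--     L = sum(dl for _, dl in cmds)
--     out = []
--     for dh, dl in reversed(cmds):
--         out.append(LIGHTNESS[(1 + L) % 3] + HUE[H % 6])
--         H -= dh
--         L -= dl
--     out.append(LIGHTNESS[(1 + L) % 3] + HUE[H % 6])
--     return " ".join(reversed(out))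
-- ===== Notes on version B (the rewrite author's own statement) =====
-- stated objective: alternative
-- what changed: B reverses the strategy: it first sums all deltas, then traverses the commands backwards, reconstructing each earlier state by subtracting deltas and emitting the tokens back-to-front (reversed at the end), instead of A's forward state-machine with a '+[OUT]' sentinel.
import Mathlib
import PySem

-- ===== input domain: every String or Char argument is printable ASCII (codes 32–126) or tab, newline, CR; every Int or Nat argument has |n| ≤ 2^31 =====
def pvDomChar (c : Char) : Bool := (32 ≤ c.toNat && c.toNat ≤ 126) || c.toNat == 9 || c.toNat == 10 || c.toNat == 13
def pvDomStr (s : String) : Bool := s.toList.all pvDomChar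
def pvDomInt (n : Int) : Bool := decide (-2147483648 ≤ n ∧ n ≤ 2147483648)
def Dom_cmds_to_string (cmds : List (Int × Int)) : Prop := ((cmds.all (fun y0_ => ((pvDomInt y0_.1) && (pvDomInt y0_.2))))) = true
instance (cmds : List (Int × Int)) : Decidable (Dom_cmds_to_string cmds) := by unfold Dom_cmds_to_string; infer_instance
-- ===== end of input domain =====

-- B computes the total delta sums first and walks the commands backwards, emitting tokens
-- back-to-front by subtraction, instead of A's forward state machine with a sentinel (alternative).


-- ===== PORT A =====
def pvOUT : Int × Int := (5, 1)

def pvTransition (cell : Int × Int) (cmd : Int × Int) : Int × Int :=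
  (PySem.Int.mod (cell.1 + cmd.1) 6, PySem.Int.mod (cell.2 + cmd.2) 3)

def pvHUE : List Char := ['r', 'y', 'g', 'c', 'b', 'm']

def pvLIGHTNESS : List Char := ['l', 'n', 'd']

-- loop body of A: append LIGHTNESS[j]+HUE[i] for the current cell, then transition
def pvStepA (st : (Int × Int) × List String) (cmd : Int × Int) : (Int × Int) × List String :=
  (pvTransition st.1 cmd,
   st.2 ++ [String.ofList [PySem.List.pyGetD pvLIGHTNESS st.1.2 'l',
                       PySem.List.pyGetD pvHUE st.1.1 'r']])

def cmds_to_string (cmds : List (Int × Int)) : String :=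
  let r := (cmds ++ [pvOUT]).foldl pvStepA ((0, 1), [])
  PySem.Str.join " " r.2

-- ===== PORT B =====
-- sum(dh for dh, _ in cmds) / sum(dl for _, dl in cmds)
def pvSumH (cmds : List (Int × Int)) : Int := cmds.foldl (fun a c => a + c.1) 0
def pvSumL (cmds : List (Int × Int)) : Int := cmds.foldl (fun a c => a + c.2) 0

-- loop body of B over reversed(cmds): emit the token for the current raw sums, then subtract
def pvStepB (st : Int × Int × List String) (cmd : Int × Int) : Int × Int × List String :=
  (st.1 - cmd.1, st.2.1 - cmd.2,
   st.2.2 ++ [String.ofList [PySem.List.pyGetD pvLIGHTNESS (PySem.Int.mod (1 + st.2.1) 3) 'l',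
                         PySem.List.pyGetD pvHUE (PySem.Int.mod st.1 6) 'r']])

def cmds_to_string_alt (cmds : List (Int × Int)) : String :=
  let r := cmds.reverse.foldl pvStepB (pvSumH cmds, pvSumL cmds, [])
  let out := r.2.2 ++ [String.ofList [PySem.List.pyGetD pvLIGHTNESS (PySem.Int.mod (1 + r.2.1) 3) 'l',
                                  PySem.List.pyGetD pvHUE (PySem.Int.mod r.1 6) 'r']]
  PySem.Str.join " " out.reverse

-- ===== PRECONDITION & SPEC =====
def Spec_cmds_to_string (cmds : List (Int × Int)) (out : String) : Prop := out = cmds_to_string_alt cmds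
instance (cmds : List (Int × Int)) (out : String) : Decidable (Spec_cmds_to_string cmds out) := by unfold Spec_cmds_to_string; infer_instance

-- ===== CLAIM (what is proved, stated in full; the proofs are below) =====
def Claim_equal_cmds_to_string : Prop := ∀ (cmds : List (Int × Int)), Dom_cmds_to_string cmds → Spec_cmds_to_string cmds (cmds_to_string cmds)

-- ===== LEMMAS AND PROOFS =====

-- the cell string for raw delta sums sh, sl (state is (sh % 6, (1+sl) % 3))
def pvCell (sh sl : Int) : String :=
  String.ofList [PySem.List.pyGetD pvLIGHTNESS (PySem.Int.mod (1 + sl) 3) 'l',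
             PySem.List.pyGetD pvHUE (PySem.Int.mod sh 6) 'r']

-- the cell strings after each command, starting from raw sums sh, sl
def pvTail : List (Int × Int) → Int → Int → List String
  | [], _, _ => []
  | c :: cs, sh, sl => pvCell (sh + c.1) (sl + c.2) :: pvTail cs (sh + c.1) (sl + c.2)

theorem pvTail_nil (sh sl : Int) : pvTail [] sh sl = [] := rfl

theorem pvTail_cons (c : Int × Int) (cs : List (Int × Int)) (sh sl : Int) :
    pvTail (c :: cs) sh sl = pvCell (sh + c.1) (sl + c.2) :: pvTail cs (sh + c.1) (sl + c.2) := rfl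

theorem pvModShift (sh sl dh dl : Int) :
    pvTransition (PySem.Int.mod sh 6, PySem.Int.mod (1 + sl) 3) (dh, dl)
      = (PySem.Int.mod (sh + dh) 6, PySem.Int.mod (1 + (sl + dl)) 3) := by
  simp only [pvTransition,
    PySem.Int.mod_eq_emod_of_pos (show (0:Int) < 6 by norm_num),
    PySem.Int.mod_eq_emod_of_pos (show (0:Int) < 3 by norm_num), Prod.mk.injEq]
  constructor <;> omega

theorem pvLemA (cmds : List (Int × Int)) : ∀ (sh sl : Int) (acc : List String),
    (fun r => r.2 ++ [String.ofList [PySem.List.pyGetD pvLIGHTNESS r.1.2 'l',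
                                 PySem.List.pyGetD pvHUE r.1.1 'r']])
      (cmds.foldl pvStepA ((PySem.Int.mod sh 6, PySem.Int.mod (1 + sl) 3), acc))
      = acc ++ (pvCell sh sl :: pvTail cmds sh sl) := by
  induction cmds with
  | nil => intro sh sl acc; simp [pvCell, pvTail_nil]
  | cons c cs ih =>
    intro sh sl acc
    have hstep : pvStepA ((PySem.Int.mod sh 6, PySem.Int.mod (1 + sl) 3), acc) c
        = ((PySem.Int.mod (sh + c.1) 6, PySem.Int.mod (1 + (sl + c.2)) 3),
           acc ++ [pvCell sh sl]) := by
      simp only [pvStepA, pvCell]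
      exact Prod.ext (pvModShift sh sl c.1 c.2) rfl
    simp only [List.foldl_cons, hstep, ih (sh + c.1) (sl + c.2) (acc ++ [pvCell sh sl]),
      pvTail_cons, List.append_assoc, List.singleton_append]

theorem pvSumH_foldl (cs : List (Int × Int)) : ∀ a : Int, cs.foldl (fun a c => a + c.1) a = a + pvSumH cs := by
  induction cs with
  | nil => intro a; simp [pvSumH]
  | cons c cs ih =>
    intro a
    rw [List.foldl_cons, ih (a + c.1)]
    have h2 : pvSumH (c :: cs) = 0 + c.1 + pvSumH cs := by
      rw [pvSumH, List.foldl_cons]; exact ih (0 + c.1)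
    rw [h2]; ring

theorem pvSumL_foldl (cs : List (Int × Int)) : ∀ a : Int, cs.foldl (fun a c => a + c.2) a = a + pvSumL cs := by
  induction cs with
  | nil => intro a; simp [pvSumL]
  | cons c cs ih =>
    intro a
    rw [List.foldl_cons, ih (a + c.2)]
    have h2 : pvSumL (c :: cs) = 0 + c.2 + pvSumL cs := by
      rw [pvSumL, List.foldl_cons]; exact ih (0 + c.2)
    rw [h2]; ring

theorem pvSumH_cons (c : Int × Int) (cs : List (Int × Int)) : pvSumH (c :: cs) = c.1 + pvSumH cs := by
  simp only [pvSumH, List.foldl_cons, Int.zero_add]; exact pvSumH_foldl cs c.1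

theorem pvSumL_cons (c : Int × Int) (cs : List (Int × Int)) : pvSumL (c :: cs) = c.2 + pvSumL cs := by
  simp only [pvSumL, List.foldl_cons, Int.zero_add]; exact pvSumL_foldl cs c.2

-- the backward loop, started at the forward end-sums, rebuilds the forward tail reversed
theorem pvLemB (cs : List (Int × Int)) : ∀ (sh sl : Int) (acc : List String),
    cs.reverse.foldl pvStepB (sh + pvSumH cs, sl + pvSumL cs, acc)
      = (sh, sl, acc ++ (pvTail cs sh sl).reverse) := by
  induction cs with
  | nil => intro sh sl acc; simp [pvSumH, pvSumL, pvTail_nil]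
  | cons c cs ih =>
    intro sh sl acc
    rw [List.reverse_cons, List.foldl_append, pvSumH_cons, pvSumL_cons,
        show sh + (c.1 + pvSumH cs) = (sh + c.1) + pvSumH cs by ring,
        show sl + (c.2 + pvSumL cs) = (sl + c.2) + pvSumL cs by ring,
        ih (sh + c.1) (sl + c.2) acc]
    simp only [List.foldl_cons, List.foldl_nil, pvStepB, pvTail_cons, List.reverse_cons,
      pvCell, List.append_assoc]
    refine Prod.ext (by ring) (Prod.ext (by ring) rfl)

-- ===== VERDICT (by name: the statement is the Claim_ definition above) =====
theorem cmds_to_string_spec : Claim_equal_cmds_to_string := by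
  intro cmds _
  unfold Spec_cmds_to_string cmds_to_string cmds_to_string_alt
  have h0 : ((0 : Int), (1 : Int)) = (PySem.Int.mod 0 6, PySem.Int.mod (1 + 0) 3) := by decide
  have hA := pvLemA cmds 0 0 []
  have hB := pvLemB cmds 0 0 []
  simp only [Int.zero_add, List.nil_append] at hB
  simp only [List.foldl_append, List.foldl_cons, List.foldl_nil, pvStepA, pvOUT] at hA ⊢
  rw [h0, hA, hB]
  have hcell : String.ofList [PySem.List.pyGetD pvLIGHTNESS (PySem.Int.mod (1 + (0:Int)) 3) 'l',
      PySem.List.pyGetD pvHUE (PySem.Int.mod (0:Int) 6) 'r'] = pvCell 0 0 := rfl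
  simp only [List.nil_append, hcell, List.reverse_append, List.reverse_reverse,
    List.reverse_cons, List.reverse_nil, List.nil_append, List.singleton_append]
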